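-- pv_equiv track=rewrite | github.com/TheExGenesis/birdseye | src/utils/data.py | get_descendant_clusters
-- ===== SOURCE A (Python) =====
-- from typing import Dict, List, Any, Optional
--
-- def get_descendant_clusters(
--     cluster_id: str, clusters_by_parent: Dict[str, List[Dict[str, Any]]]
-- ) -> List[str]:
--     """Get all descendant cluster IDs for a given cluster"""
--     descendants: List[str] = []
--     children = clusters_by_parent.get(str(cluster_id), [])
--     for child in children:
--         child_id = str(child["cluster_id"])
--         descendants.append(child_id)
--         descendants.extend(get_descendant_clusters(child_id, clusters_by_parent))
--     return descendants
-- ===== SOURCE B (Python) =====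
-- from typing import Dict, List, Any
--
-- def get_descendant_clusters(
--     cluster_id: str, clusters_by_parent: Dict[str, List[Dict[str, Any]]]
-- ) -> List[str]:
--     """Get all descendant cluster IDs for a given cluster"""
--     descendants: List[str] = []
--     stack = [str(c["cluster_id"]) for c in reversed(clusters_by_parent.get(str(cluster_id), []))]
--     while stack:
--         node = stack.pop()
--         descendants.append(node)
--         stack.extend(str(c["cluster_id"]) for c in reversed(clusters_by_parent.get(node, [])))
--     return descendants
-- ===== Notes on version B (the rewrite author's own statement) =====
-- stated objective: alternative
-- what changed: A's recursion builds a fresh list per node and copies each subtree's result into every ancestor's list via extend; B is an iterative pre-order DFS with an explicit stack (children pushed in reverse) appending each id exactly once to one output list.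
import Mathlib
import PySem

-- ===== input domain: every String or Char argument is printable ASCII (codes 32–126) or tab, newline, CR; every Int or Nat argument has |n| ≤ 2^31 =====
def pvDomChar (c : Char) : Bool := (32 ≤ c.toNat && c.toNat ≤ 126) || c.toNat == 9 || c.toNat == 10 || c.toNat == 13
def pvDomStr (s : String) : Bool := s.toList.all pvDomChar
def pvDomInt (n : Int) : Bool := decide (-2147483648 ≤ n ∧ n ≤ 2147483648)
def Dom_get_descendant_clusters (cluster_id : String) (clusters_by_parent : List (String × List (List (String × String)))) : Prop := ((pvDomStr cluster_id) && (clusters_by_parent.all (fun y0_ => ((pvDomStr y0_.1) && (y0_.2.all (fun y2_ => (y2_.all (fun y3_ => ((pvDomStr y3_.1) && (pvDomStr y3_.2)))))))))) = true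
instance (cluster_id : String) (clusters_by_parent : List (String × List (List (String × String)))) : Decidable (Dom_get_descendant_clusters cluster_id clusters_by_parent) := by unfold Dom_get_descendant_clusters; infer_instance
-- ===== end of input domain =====

-- B replaces A's list-concatenating recursion (each subtree's result copied into every
-- ancestor's list via extend) with an iterative explicit-stack pre-order DFS that appends
-- each id once to a single output list (objective: alternative).

-- shared reading of the input (used verbatim by both ports):
-- clusters_by_parent.get(k, [])  — dict lookup, first match
def pvChildren (clusters_by_parent : List (String × List (List (String × String)))) (k : String) : List (List (String × String)) :=
  (PySem.Dict.mk clusters_by_parent).getD k []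
-- str(child["cluster_id"]) — str is identity on strings; Python raises KeyError when the key
-- is missing, the "" default is never reached inside Pre_ (Pre_ excludes those inputs)
def pvChildId (child : List (String × String)) : String :=
  (PySem.Dict.mk child).getD "cluster_id" ""

-- ===== PORT A =====
-- A recurses once per tree level; inside Pre_ (no cycle, so no chain of more than
-- clusters_by_parent.length parent keys) fuel length+1 never runs out, exact there.
def pvGoA (clusters_by_parent : List (String × List (List (String × String)))) : Nat → String → List String
  | 0, _ => []
  | f+1, k =>
    (pvChildren clusters_by_parent k).foldl
      (fun descendants child =>
        let child_id := pvChildId child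
        (descendants ++ [child_id]) ++ pvGoA clusters_by_parent f child_id) []

def get_descendant_clusters (cluster_id : String) (clusters_by_parent : List (String × List (List (String × String)))) : List String :=
  pvGoA clusters_by_parent (clusters_by_parent.length + 1) cluster_id

-- ===== PORT B =====
-- maximum length of any children list in the input (0 for none)
def pvMaxKids (clusters_by_parent : List (String × List (List (String × String)))) : Nat :=
  clusters_by_parent.foldr (fun p m => max p.2.length m) 0
-- fuel: one unit per stack pop; pops = output length < (maxKids+1)^(length+1) inside Pre_
def pvFuel (clusters_by_parent : List (String × List (List (String × String)))) : Nat :=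
  (pvMaxKids clusters_by_parent + 1) ^ (clusters_by_parent.length + 1)

-- the while-stack loop of B: Python's list END (pop/extend side) is this list's HEAD, so
-- Python's 'extend(reversed(children ids))' is prepending the ids in their original order
def pvRun (clusters_by_parent : List (String × List (List (String × String)))) : Nat → List String → List String → List String
  | 0, _, descendants => descendants
  | _+1, [], descendants => descendants
  | f+1, node :: stack, descendants =>
    pvRun clusters_by_parent f (((pvChildren clusters_by_parent node).map pvChildId) ++ stack) (descendants ++ [node])

def get_descendant_clusters_alt (cluster_id : String) (clusters_by_parent : List (String × List (List (String × String)))) : List String :=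
  pvRun clusters_by_parent (pvFuel clusters_by_parent) ((pvChildren clusters_by_parent cluster_id).map pvChildId) []

-- ===== PRECONDITION & SPEC =====
-- helpers for Pre_: the set of ids exactly n child-steps from the root
def pvFrontier (clusters_by_parent : List (String × List (List (String × String)))) (root : String) : Nat → List String
  | 0 => [root]
  | n+1 => PySem.Set.ofList ((pvFrontier clusters_by_parent root n).flatMap
      (fun k => (pvChildren clusters_by_parent k).map pvChildId))
def pvReach (clusters_by_parent : List (String × List (List (String × String)))) (root : String) : List String :=
  (List.range (clusters_by_parent.length + 1)).flatMap (pvFrontier clusters_by_parent root)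

-- Pre_ excludes exactly the inputs where Python A raises: a cycle among reachable parent keys
-- (RecursionError; equivalently some id lies length+1 child-steps from the root) or a reachable
-- child record without a "cluster_id" key (KeyError).
def Pre_get_descendant_clusters (cluster_id : String) (clusters_by_parent : List (String × List (List (String × String)))) : Prop :=
  pvFrontier clusters_by_parent cluster_id (clusters_by_parent.length + 1) = [] ∧
  ∀ k ∈ pvReach clusters_by_parent cluster_id,
    ∀ child ∈ pvChildren clusters_by_parent k, (PySem.Dict.mk child).get? "cluster_id" ≠ none
instance (cluster_id : String) (clusters_by_parent : List (String × List (List (String × String)))) : Decidable (Pre_get_descendant_clusters cluster_id clusters_by_parent) := by unfold Pre_get_descendant_clusters; infer_instance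

def pvWitness_get_descendant_clusters : String × (List (String × List (List (String × String)))) :=
  ("a", [("a", [[("cluster_id", "b")], [("cluster_id", "c")]]), ("b", [[("cluster_id", "c")]])])

def Spec_get_descendant_clusters (cluster_id : String) (clusters_by_parent : List (String × List (List (String × String)))) (out : List String) : Prop := out = get_descendant_clusters_alt cluster_id clusters_by_parent
instance (cluster_id : String) (clusters_by_parent : List (String × List (List (String × String)))) (out : List String) : Decidable (Spec_get_descendant_clusters cluster_id clusters_by_parent out) := by unfold Spec_get_descendant_clusters; infer_instance

-- ===== CLAIM (what is proved, stated in full; the proofs are below) =====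
def Claim_equal_get_descendant_clusters : Prop := ∀ (cluster_id : String) (clusters_by_parent : List (String × List (List (String × String)))), Dom_get_descendant_clusters cluster_id clusters_by_parent → Pre_get_descendant_clusters cluster_id clusters_by_parent → Spec_get_descendant_clusters cluster_id clusters_by_parent (get_descendant_clusters cluster_id clusters_by_parent)

-- ===== LEMMAS AND PROOFS =====

-- A's per-node loop is a flatMap of "child id, then its descendants"
theorem pvGoA_foldl (cbp : List (String × List (List (String × String)))) (f : Nat) :
    ∀ (l : List (List (String × String))) (acc : List String),
      l.foldl (fun descendants child =>
          (descendants ++ [pvChildId child]) ++ pvGoA cbp f (pvChildId child)) acc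
        = acc ++ l.flatMap (fun c => pvChildId c :: pvGoA cbp f (pvChildId c)) := by
  intro l
  induction l with
  | nil => intro acc; simp
  | cons c l ihl => intro acc; rw [List.foldl_cons, ihl]; simp

theorem pvGoA_succ (cbp : List (String × List (List (String × String)))) (f : Nat) (k : String) :
    pvGoA cbp (f+1) k
      = (pvChildren cbp k).flatMap (fun c => pvChildId c :: pvGoA cbp f (pvChildId c)) := by
  rw [pvGoA, pvGoA_foldl, List.nil_append]

-- every children list of the dict is at most pvMaxKids long
theorem pvChildren_len (cbp : List (String × List (List (String × String)))) (k : String) :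
    (pvChildren cbp k).length ≤ pvMaxKids cbp := by
  induction cbp with
  | nil => simp [pvChildren, pvMaxKids, PySem.Dict.getD_eq_get?_getD, PySem.Dict.get?]
  | cons p rest ih =>
    rw [pvChildren, PySem.Dict.getD_eq_get?_getD, PySem.Dict.get?_mk_cons]
    rw [pvChildren, PySem.Dict.getD_eq_get?_getD] at ih
    by_cases h : p.1 == k
    · simp [h, pvMaxKids]
    · simp only [h, Bool.false_eq_true, if_false]
      exact le_trans ih (by simp [pvMaxKids])

-- A's output is shorter than the fuel B gets
theorem pvGoA_len (cbp : List (String × List (List (String × String)))) :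
    ∀ (f : Nat) (k : String), (pvGoA cbp f k).length < (pvMaxKids cbp + 1) ^ f := by
  intro f
  induction f with
  | zero => intro k; simp [pvGoA]
  | succ f ih =>
    intro k
    rw [pvGoA_succ, List.length_flatMap]
    have hterm : ∀ x ∈ (pvChildren cbp k).map (fun c => (pvChildId c :: pvGoA cbp f (pvChildId c)).length),
        x ≤ (pvMaxKids cbp + 1) ^ f := by
      intro x hx
      simp only [List.mem_map] at hx
      obtain ⟨c, _, rfl⟩ := hx
      have := ih (pvChildId c)
      simp only [List.length_cons]
      omega
    have hsum := List.sum_le_card_nsmul _ _ hterm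
    have hlen : ((pvChildren cbp k).map (fun c => (pvChildId c :: pvGoA cbp f (pvChildId c)).length)).length ≤ pvMaxKids cbp := by
      simpa using pvChildren_len cbp k
    have hp : 1 ≤ (pvMaxKids cbp + 1) ^ f := Nat.one_le_pow _ _ (by omega)
    have : ((pvChildren cbp k).map (fun c => (pvChildId c :: pvGoA cbp f (pvChildId c)).length)).sum
        ≤ pvMaxKids cbp * (pvMaxKids cbp + 1) ^ f := by
      calc _ ≤ _ := hsum
        _ ≤ pvMaxKids cbp * (pvMaxKids cbp + 1) ^ f := by
          simpa [smul_eq_mul] using Nat.mul_le_mul_right ((pvMaxKids cbp + 1) ^ f) hlen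
    calc _ ≤ pvMaxKids cbp * (pvMaxKids cbp + 1) ^ f := this
      _ < (pvMaxKids cbp + 1) ^ (f + 1) := by
        rw [pow_succ]
        nlinarith
  
-- frontier membership propagates from a child up to its parent (one more step)
theorem pvFrontier_child_mem (cbp : List (String × List (List (String × String)))) (k : String)
    (c : List (String × String)) (hc : c ∈ pvChildren cbp k) :
    ∀ (n : Nat) (x : String), x ∈ pvFrontier cbp (pvChildId c) n → x ∈ pvFrontier cbp k (n+1) := by
  intro n
  induction n with
  | zero =>
    intro x hx
    simp only [pvFrontier, List.mem_singleton] at hx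
    subst hx
    rw [pvFrontier, PySem.Set.mem_ofList]
    simp only [pvFrontier, List.flatMap_cons, List.flatMap_nil]
    simp
    exact ⟨c, hc, rfl⟩
  | succ n ihn =>
    intro x hx
    rw [pvFrontier, PySem.Set.mem_ofList, List.mem_flatMap] at hx
    obtain ⟨j, hj, hxj⟩ := hx
    rw [show n+1+1 = (n+1)+1 from rfl, pvFrontier, PySem.Set.mem_ofList, List.mem_flatMap]
    exact ⟨j, ihn j hj, hxj⟩

-- hence an empty parent frontier forces empty child frontiers one step down
theorem pvFrontier_child_nil (cbp : List (String × List (List (String × String)))) (k : String)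
    (n : Nat) (h : pvFrontier cbp k (n+1) = [])
    (c : List (String × String)) (hc : c ∈ pvChildren cbp k) :
    pvFrontier cbp (pvChildId c) n = [] := by
  rcases hF : pvFrontier cbp (pvChildId c) n with _ | ⟨x, l⟩
  · rfl
  · have : x ∈ pvFrontier cbp k (n+1) :=
      pvFrontier_child_mem cbp k c hc n x (by rw [hF]; exact List.mem_cons_self)
    rw [h] at this
    exact absurd this (List.not_mem_nil)

-- the stack loop: with enough fuel, a stack of pending nodes (ghost-annotated with the
-- depth at which each node's frontier has died out) emits exactly A's expansions in order
theorem pvRun_eq (cbp : List (String × List (List (String × String)))) :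
    ∀ (f : Nat) (P : List (Nat × String)) (out : List String),
      (∀ p ∈ P, pvFrontier cbp p.2 p.1 = []) →
      (P.flatMap (fun p => p.2 :: pvGoA cbp p.1 p.2)).length ≤ f →
      pvRun cbp f (P.map Prod.snd) out = out ++ P.flatMap (fun p => p.2 :: pvGoA cbp p.1 p.2) := by
  intro f
  induction f with
  | zero =>
    intro P out _ hlen
    rcases P with _ | ⟨p, P'⟩
    · simp only [List.map_nil, List.flatMap_nil, List.append_nil]; rfl
    · simp at hlen
  | succ f ih =>
    intro P out hF hlen
    rcases P with _ | ⟨⟨d, k⟩, P'⟩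
    · simp only [List.map_nil, List.flatMap_nil, List.append_nil]; rfl
    · have hk : pvFrontier cbp k d = [] := hF (d, k) List.mem_cons_self
      rcases d with _ | d'
      · exfalso; simp [pvFrontier] at hk
      · -- one pop: emit k, push its children (depth d')
        rw [List.map_cons, pvRun]
        have hstep := ih ((pvChildren cbp k).map (fun c => (d', pvChildId c)) ++ P') (out ++ [k])
          (by
            intro p hp
            rcases List.mem_append.mp hp with h1 | h2
            · obtain ⟨c, hc, rfl⟩ := List.mem_map.mp h1
              exact pvFrontier_child_nil cbp k d' hk c hc
            · exact hF p (List.mem_cons_of_mem _ h2))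
          (by
            have h1 : ((pvChildren cbp k).map (fun c => (d', pvChildId c)) ++ P').flatMap
                  (fun p => p.2 :: pvGoA cbp p.1 p.2)
                = pvGoA cbp (d'+1) k ++ P'.flatMap (fun p => p.2 :: pvGoA cbp p.1 p.2) := by
              rw [List.flatMap_append, List.flatMap_map, pvGoA_succ]
            rw [h1, List.length_append]
            simp only [List.flatMap_cons, List.length_append, List.length_cons] at hlen
            omega)
        have h2 : (((pvChildren cbp k).map (fun c => (d', pvChildId c)) ++ P').map Prod.snd)
            = (pvChildren cbp k).map pvChildId ++ P'.map Prod.snd := by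
          rw [List.map_append, List.map_map]
          rfl
        have h3 : ((pvChildren cbp k).map (fun c => (d', pvChildId c)) ++ P').flatMap
              (fun p => p.2 :: pvGoA cbp p.1 p.2)
            = pvGoA cbp (d'+1) k ++ P'.flatMap (fun p => p.2 :: pvGoA cbp p.1 p.2) := by
          rw [List.flatMap_append, List.flatMap_map, pvGoA_succ]
        rw [h2] at hstep
        rw [hstep, h3, List.flatMap_cons]
        simp

-- ===== VERDICT (by name: the statement is the Claim_ definition above) =====
theorem get_descendant_clusters_spec : Claim_equal_get_descendant_clusters := by
  intro cluster_id cbp _ hPre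
  obtain ⟨hFr, _⟩ := hPre
  show get_descendant_clusters cluster_id cbp = get_descendant_clusters_alt cluster_id cbp
  rw [get_descendant_clusters, get_descendant_clusters_alt]
  have hmap : (pvChildren cbp cluster_id).map pvChildId
      = ((pvChildren cbp cluster_id).map (fun c => (cbp.length, pvChildId c))).map Prod.snd := by
    rw [List.map_map]
    rfl
  have hflat : ((pvChildren cbp cluster_id).map (fun c => (cbp.length, pvChildId c))).flatMap
        (fun p => p.2 :: pvGoA cbp p.1 p.2) = pvGoA cbp (cbp.length + 1) cluster_id := by
    rw [List.flatMap_map, pvGoA_succ]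
  have hrun := pvRun_eq cbp (pvFuel cbp)
    ((pvChildren cbp cluster_id).map (fun c => (cbp.length, pvChildId c))) []
    (by
      intro p hp
      obtain ⟨c, hc, rfl⟩ := List.mem_map.mp hp
      exact pvFrontier_child_nil cbp cluster_id cbp.length hFr c hc)
    (by
      rw [hflat]
      have := pvGoA_len cbp (cbp.length + 1) cluster_id
      rw [pvFuel]
      omega)
  rw [hmap, hrun, hflat, List.nil_append]
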